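-- pv_equiv track=rewrite | github.com/cajo-dk/mycousinvinyl-ha | mycousinvinyl/discogs-service/app/discogs_client.py | _collect_extraartist_names
-- ===== SOURCE A (Python) =====
-- from typing import Optional, Tuple
--
-- def _collect_extraartist_names(extraartists: list[dict], role_tokens: tuple[str, ...]) -> Optional[str]:
--     names = []
--     for artist in extraartists:
--         role = str(artist.get("role") or "").lower()
--         if any(token in role for token in role_tokens):
--             name = artist.get("name")
--             if name:
--                 names.append(str(name).strip())
--     return _join_unique(names)
--
-- def _join_unique(values: list[str], preserve_order: bool = True, separator: str = "; ") -> Optional[str]: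
--     filtered = [value for value in values if value]
--     if not filtered:
--         return None
--     if preserve_order:
--         seen = set()
--         deduped = []
--         for value in filtered:
--             key = value.lower()
--             if key in seen:
--                 continue
--             seen.add(key)
--             deduped.append(value)
--     else:
--         deduped = list({value for value in filtered})
--     return separator.join(deduped)
-- ===== SOURCE B (Python) =====
-- def _collect_extraartist_names(extraartists, role_tokens):
--     def nub(values):
--         # keep-first case-insensitive dedup by recursion: keep the head and
--         # recurse on the tail with the head's case-variants filtered out
--         if not values:
--             return []
--         head = values[0]
--         rest = [v for v in values[1:] if v.lower() != head.lower()]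
--         return [head] + nub(rest)
--
--     candidates = [
--         stripped
--         for artist in extraartists
--         if any(token in str(artist.get("role") or "").lower() for token in role_tokens)
--         for stripped in [str(artist.get("name") or "").strip()]
--         if stripped
--     ]
--     deduped = nub(candidates)
--     return "; ".join(deduped) if deduped else None
-- ===== Notes on version B (the rewrite author's own statement) =====
-- stated objective: alternative
-- what changed: Replaces A's collect-then-helper structure (seen-set + output-list loop inside _join_unique) by a comprehension building the candidate list and a recursive nub that dedups by filtering the head's case-variants out of the tail before recursing, with no seen set at all.
import Mathlib
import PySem

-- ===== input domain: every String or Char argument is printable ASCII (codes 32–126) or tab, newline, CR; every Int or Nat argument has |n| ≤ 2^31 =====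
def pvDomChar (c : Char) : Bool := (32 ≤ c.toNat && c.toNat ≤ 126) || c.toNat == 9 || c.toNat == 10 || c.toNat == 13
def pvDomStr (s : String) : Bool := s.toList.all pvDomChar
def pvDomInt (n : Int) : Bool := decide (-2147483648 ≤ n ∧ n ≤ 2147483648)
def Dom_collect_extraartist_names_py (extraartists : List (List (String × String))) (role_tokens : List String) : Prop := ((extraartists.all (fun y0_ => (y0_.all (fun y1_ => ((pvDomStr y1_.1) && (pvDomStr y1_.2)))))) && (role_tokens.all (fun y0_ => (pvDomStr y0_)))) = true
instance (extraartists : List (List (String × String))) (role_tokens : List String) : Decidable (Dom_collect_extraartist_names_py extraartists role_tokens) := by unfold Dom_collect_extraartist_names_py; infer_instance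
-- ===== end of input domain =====

-- B replaces A's seen-set dedup loop (in the _join_unique helper) by a comprehension
-- over the input plus a recursive filter-based nub with no seen set (objective: alternative).

-- ===== PORT A =====
-- Port of `_join_unique` as A calls it: preserve_order = True, separator = "; " (the defaults).
def join_unique_py (values : List String) : Option String :=
  let filtered := values.filter (fun v => v ≠ "")
  if filtered = [] then none
  else
    let st := filtered.foldl
      (fun (st : PySem.Set String × List String) value =>
        let key := PySem.Str.lower value
        if PySem.Set.contains st.1 key then st
        else (PySem.Set.add st.1 key, st.2 ++ [value]))
      (PySem.Set.empty, [])
    some (PySem.Str.join "; " st.2)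

def collect_extraartist_names_py (extraartists : List (List (String × String))) (role_tokens : List String) : Option String :=
  let names := extraartists.foldl
    (fun (names : List String) artist =>
      let role := PySem.Str.lower (((PySem.Dict.ofList artist).get? "role").getD "")
      if role_tokens.any (fun token => PySem.Str.isIn token role) then
        match (PySem.Dict.ofList artist).get? "name" with
        | some name => if name ≠ "" then names ++ [PySem.Str.strip name] else names
        | none => names
      else names)
    []
  join_unique_py names

-- ===== PORT B =====
-- recursive keep-first case-insensitive dedup: keep the head, filter its
-- case-variants out of the tail, recurse (Source B's `nub`)
def pyNub : List String → List String
  | [] => []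
  | v :: rest =>
    v :: pyNub (rest.filter (fun w => PySem.Str.lower w ≠ PySem.Str.lower v))
termination_by l => l.length
decreasing_by
  simp only [List.length_cons, List.length_unattach]
  exact Nat.lt_succ_of_le (le_trans (List.length_filter_le _ _) (by simp))

def collect_extraartist_names_py_alt (extraartists : List (List (String × String))) (role_tokens : List String) : Option String :=
  let candidates := extraartists.flatMap (fun artist =>
    if role_tokens.any (fun token => PySem.Str.isIn token
        (PySem.Str.lower (((PySem.Dict.ofList artist).get? "role").getD ""))) then
      let stripped := PySem.Str.strip (((PySem.Dict.ofList artist).get? "name").getD "")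
      if stripped ≠ "" then [stripped] else []
    else [])
  let deduped := pyNub candidates
  if deduped = [] then none else some (PySem.Str.join "; " deduped)

-- ===== PRECONDITION & SPEC =====
def Spec_collect_extraartist_names_py (extraartists : List (List (String × String))) (role_tokens : List String) (out : Option String) : Prop := out = collect_extraartist_names_py_alt extraartists role_tokens
instance (extraartists : List (List (String × String))) (role_tokens : List String) (out : Option String) : Decidable (Spec_collect_extraartist_names_py extraartists role_tokens out) := by unfold Spec_collect_extraartist_names_py; infer_instance

-- ===== CLAIM (what is proved, stated in full; the proofs are below) =====
def Claim_equal_collect_extraartist_names_py : Prop := ∀ (extraartists : List (List (String × String))) (role_tokens : List String), Dom_collect_extraartist_names_py extraartists role_tokens → Spec_collect_extraartist_names_py extraartists role_tokens (collect_extraartist_names_py extraartists role_tokens)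

-- ===== LEMMAS AND PROOFS =====

-- the (0- or 1-element) list A's filter loop contributes for one artist
def pvContrib (role_tokens : List String) (artist : List (String × String)) : List String :=
  let role := PySem.Str.lower (((PySem.Dict.ofList artist).get? "role").getD "")
  if role_tokens.any (fun token => PySem.Str.isIn token role) then
    match (PySem.Dict.ofList artist).get? "name" with
    | some name => if name ≠ "" then [PySem.Str.strip name] else []
    | none => []
  else []

-- the dedup step of `_join_unique`
def pvDedup (st : PySem.Set String × List String) (value : String) : PySem.Set String × List String :=
  let key := PySem.Str.lower value
  if PySem.Set.contains st.1 key then st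
  else (PySem.Set.add st.1 key, st.2 ++ [value])

lemma namesA_eq (role_tokens : List String) (extraartists : List (List (String × String)))
    (acc : List String) :
    extraartists.foldl
      (fun (names : List String) artist =>
        let role := PySem.Str.lower (((PySem.Dict.ofList artist).get? "role").getD "")
        if role_tokens.any (fun token => PySem.Str.isIn token role) then
          match (PySem.Dict.ofList artist).get? "name" with
          | some name => if name ≠ "" then names ++ [PySem.Str.strip name] else names
          | none => names
        else names) acc
    = acc ++ extraartists.flatMap (pvContrib role_tokens) := by
  induction extraartists generalizing acc with
  | nil => simp
  | cons a l ih =>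
    simp only [List.foldl_cons, List.flatMap_cons, ih, pvContrib]
    cases h : (role_tokens.any (fun token => PySem.Str.isIn token
        (PySem.Str.lower (((PySem.Dict.ofList a).get? "role").getD "")))) with
    | false => simp
    | true =>
      cases hn : (PySem.Dict.ofList a).get? "name" with
      | none => simp
      | some name =>
        by_cases hne : name = "" <;> simp [hne]

-- A's filter-then-collect list, once empties are removed, is B's candidate list
lemma filter_contrib (role_tokens : List String) (extraartists : List (List (String × String))) :
    (extraartists.flatMap (pvContrib role_tokens)).filter (fun v => v ≠ "")
    = extraartists.flatMap (fun artist =>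
        if role_tokens.any (fun token => PySem.Str.isIn token
            (PySem.Str.lower (((PySem.Dict.ofList artist).get? "role").getD ""))) then
          let stripped := PySem.Str.strip (((PySem.Dict.ofList artist).get? "name").getD "")
          if stripped ≠ "" then [stripped] else []
        else []) := by
  have hstrip : PySem.Str.strip "" = "" := rfl
  induction extraartists with
  | nil => simp
  | cons a l ih =>
    simp only [List.flatMap_cons, List.filter_append, ih]
    congr 1
    simp only [pvContrib]
    cases h : (role_tokens.any (fun token => PySem.Str.isIn token
        (PySem.Str.lower (((PySem.Dict.ofList a).get? "role").getD "")))) with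
    | false => simp
    | true =>
      cases hn : (PySem.Dict.ofList a).get? "name" with
      | none => simp [hstrip]
      | some name =>
        by_cases hne : name = ""
        · simp [hne, hstrip]
        · by_cases hs : PySem.Str.strip name = "" <;> simp [hne, hs]

-- A's seen-set foldl equals the recursive nub of the not-yet-seen elements
lemma dedup_eq_nub (l : List String) (st : PySem.Set String × List String) :
    (l.foldl pvDedup st).2
    = st.2 ++ pyNub (l.filter (fun v => ¬ PySem.Str.lower v ∈ st.1)) := by
  induction l generalizing st with
  | nil => simp [pyNub]
  | cons v rest ih =>
    rw [List.foldl_cons]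
    by_cases h : PySem.Str.lower v ∈ st.1
    · have hc : PySem.Set.contains st.1 (PySem.Str.lower v) = true := by
        simpa [PySem.Set.contains_eq_listContains, List.contains_iff_mem] using h
      have hstep : pvDedup st v = st := by simp [pvDedup, h]
      rw [hstep, ih st,
        show (v :: rest).filter (fun w => ¬ PySem.Str.lower w ∈ st.1)
            = rest.filter (fun w => ¬ PySem.Str.lower w ∈ st.1) from by
          simp [h]]
    · have hc : PySem.Set.contains st.1 (PySem.Str.lower v) = false := by
        simp [PySem.Set.contains_eq_listContains, h]
      have hstep : pvDedup st v = (PySem.Set.add st.1 (PySem.Str.lower v), st.2 ++ [v]) := by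
        simp [pvDedup, h]
      rw [hstep, ih,
        show (v :: rest).filter (fun w => ¬ PySem.Str.lower w ∈ st.1)
            = v :: rest.filter (fun w => ¬ PySem.Str.lower w ∈ st.1) from by
          simp [h]]
      have hfl : rest.filter
            (fun w => ¬ PySem.Str.lower w ∈ PySem.Set.add st.1 (PySem.Str.lower v))
          = (rest.filter (fun w => ¬ PySem.Str.lower w ∈ st.1)).filter
              (fun w => PySem.Str.lower w ≠ PySem.Str.lower v) := by
        rw [List.filter_filter]
        apply List.filter_congr
        intro w _
        simp [PySem.Set.add_of_not_mem h, not_or, and_comm]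
      rw [show pyNub (v :: rest.filter (fun w => ¬ PySem.Str.lower w ∈ st.1))
            = v :: pyNub ((rest.filter (fun w => ¬ PySem.Str.lower w ∈ st.1)).filter
                (fun w => PySem.Str.lower w ≠ PySem.Str.lower v)) from by
          simp [pyNub]]
      rw [hfl]
      simp

lemma pyNub_nil_iff (l : List String) : pyNub l = [] ↔ l = [] := by
  cases l <;> simp [pyNub]

-- ===== VERDICT (by name: the statement is the Claim_ definition above) =====
theorem collect_extraartist_names_py_spec : Claim_equal_collect_extraartist_names_py := by
  intro ea toks _
  unfold Spec_collect_extraartist_names_py collect_extraartist_names_py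
    collect_extraartist_names_py_alt join_unique_py
  rw [namesA_eq]
  simp only [List.nil_append]
  rw [← filter_contrib]
  set fl := (ea.flatMap (pvContrib toks)).filter (fun v => v ≠ "") with hfl
  have hd : (fl.foldl pvDedup (PySem.Set.empty, [])).2 = pyNub fl := by
    rw [dedup_eq_nub]
    simp [PySem.Set.empty]
  by_cases hc : fl = []
  · simp [hc, pyNub]
  · rw [if_neg hc, if_neg (by simpa [pyNub_nil_iff] using hc)]
    show some (PySem.Str.join "; " (List.foldl pvDedup (PySem.Set.empty, []) fl).2) = _
    rw [hd]
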